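-- pv_equiv track=rewrite | github.com/madhuu559u/riskq360 | backend/extraction/date_engine.py | fill_page_best_dos_nearest
-- ===== SOURCE A (Python) =====
-- from typing import Any, Dict, List, Optional, Tuple
--
-- def fill_page_best_dos_nearest(
--     page_best_dos_map: Dict[int, Optional[str]], page_count: int
-- ) -> Dict[int, Optional[str]]:
--     """Nearest-neighbor fallback for pages without a date of service."""
--     out = dict(page_best_dos_map)
--     pages = list(range(1, page_count + 1))
--     has = {pn: out.get(pn) for pn in pages}
--     known_pages = [pn for pn in pages if has.get(pn)]
--     if not known_pages:
--         return out
--     for pn in pages: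
--         if out.get(pn):
--             continue
--         prev = [k for k in known_pages if k < pn]
--         nxt = [k for k in known_pages if k > pn]
--         prev_p = prev[-1] if prev else None
--         next_p = nxt[0] if nxt else None
--         if prev_p is None and next_p is None:
--             continue
--         if prev_p is None:
--             out[pn] = out.get(next_p)
--         elif next_p is None:
--             out[pn] = out.get(prev_p)
--         else:
--             if (pn - prev_p) <= (next_p - pn):
--                 out[pn] = out.get(prev_p)
--             else:
--                 out[pn] = out.get(next_p)
--     return out
-- ===== SOURCE B (Python) =====
-- def fill_page_best_dos_nearest(page_best_dos_map, page_count):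
--     """Nearest-neighbor fallback, single two-pointer sweep (O(n+k) instead of O(n*k))."""
--     out = dict(page_best_dos_map)
--     known = [pn for pn in range(1, page_count + 1) if out.get(pn)]
--     if not known:
--         return out
--     j = 0  # first index with known[j] >= current page; only ever advances
--     for pn in range(1, page_count + 1):
--         if out.get(pn):
--             continue
--         while j < len(known) and known[j] < pn:
--             j += 1
--         prev_p = known[j - 1] if j > 0 else None
--         next_p = known[j] if j < len(known) else None
--         if prev_p is None:
--             out[pn] = out.get(next_p)
--         elif next_p is None:
--             out[pn] = out.get(prev_p)
--         elif pn - prev_p <= next_p - pn: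
--             out[pn] = out.get(prev_p)
--         else:
--             out[pn] = out.get(next_p)
--     return out
-- ===== Notes on version B (the rewrite author's own statement) =====
-- stated objective: faster
-- what changed: A rebuilds the prev/next candidate lists by filtering all known pages for every page missing a date (O(n*k)); B computes the sorted known-page list once and fills all gaps in a single two-pointer sweep where the pointer over known pages only ever advances (O(n+k)).
import Mathlib
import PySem

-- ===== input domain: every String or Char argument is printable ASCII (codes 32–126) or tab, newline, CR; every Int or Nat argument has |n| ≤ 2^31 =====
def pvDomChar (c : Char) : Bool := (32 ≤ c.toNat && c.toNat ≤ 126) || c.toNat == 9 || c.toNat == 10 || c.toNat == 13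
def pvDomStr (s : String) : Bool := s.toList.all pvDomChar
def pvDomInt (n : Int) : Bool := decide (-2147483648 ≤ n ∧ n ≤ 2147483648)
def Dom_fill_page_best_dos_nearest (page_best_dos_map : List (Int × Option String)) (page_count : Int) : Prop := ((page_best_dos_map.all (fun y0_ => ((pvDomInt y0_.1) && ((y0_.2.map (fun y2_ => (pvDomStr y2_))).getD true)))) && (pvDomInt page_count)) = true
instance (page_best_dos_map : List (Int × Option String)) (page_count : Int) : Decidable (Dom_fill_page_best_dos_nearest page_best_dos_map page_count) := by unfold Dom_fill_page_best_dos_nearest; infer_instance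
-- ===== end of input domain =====

-- B replaces A's per-page filtering of the known-page list by a single two-pointer sweep (asymptotically faster; measured by the check).


-- Python truthiness of an Optional[str]: truthy iff a non-empty string
def pvTruthy (o : Option String) : Bool :=
  match o with
  | some s => !s.toList.isEmpty
  | none => false

-- ===== PORT A =====
-- body of A's `for pn in pages:` loop
def pvStepA (known_pages : List Int) (out : PySem.Dict Int (Option String)) (pn : Int) :
    PySem.Dict Int (Option String) :=
  if pvTruthy (out.getD pn none) then out
  else
    let prev := known_pages.filter (fun k => k < pn)
    let nxt := known_pages.filter (fun k => pn < k)
    match prev.getLast?, nxt.head? with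
    | none, none => out
    | none, some np => out.insert pn (out.getD np none)
    | some pp, none => out.insert pn (out.getD pp none)
    | some pp, some np =>
        if pn - pp ≤ np - pn then out.insert pn (out.getD pp none)
        else out.insert pn (out.getD np none)

def fill_page_best_dos_nearest (page_best_dos_map : List (Int × Option String)) (page_count : Int) :
    List (Int × Option String) :=
  let out := PySem.Dict.ofList page_best_dos_map
  let pages := PySem.List.pyRange 1 (page_count + 1) 1
  let has := pages.foldl (fun d pn => d.insert pn (out.getD pn none)) PySem.Dict.empty
  let known_pages := pages.filter (fun pn => pvTruthy (has.getD pn none))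
  if known_pages = [] then out.items
  else (pages.foldl (pvStepA known_pages) out).items

-- ===== PORT B =====
-- B's `while j < len(known) and known[j] < pn: j += 1`
def pvAdvJ (known : List Int) (pn : Int) (j : Nat) : Nat :=
  if h : j < known.length then
    if known[j] < pn then pvAdvJ known pn (j + 1) else j
  else j
termination_by known.length - j

-- body of B's sweep loop: state is (out, j)
def pvStepB (known : List Int) (st : PySem.Dict Int (Option String) × Nat) (pn : Int) :
    PySem.Dict Int (Option String) × Nat :=
  if pvTruthy (st.1.getD pn none) then st
  else
    let out := st.1
    let j := pvAdvJ known pn st.2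
    let prev_p : Option Int := if 0 < j then known[j - 1]? else none
    let next_p : Option Int := if j < known.length then known[j]? else none
    match prev_p, next_p with
    | none, none => (out.insert pn none, j)   -- out.get(None) is None (unreachable: known ≠ [])
    | none, some np => (out.insert pn (out.getD np none), j)
    | some pp, none => (out.insert pn (out.getD pp none), j)
    | some pp, some np =>
        if pn - pp ≤ np - pn then (out.insert pn (out.getD pp none), j)
        else (out.insert pn (out.getD np none), j)

def fill_page_best_dos_nearest_alt (page_best_dos_map : List (Int × Option String)) (page_count : Int) :
    List (Int × Option String) :=
  let out := PySem.Dict.ofList page_best_dos_map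
  let pages := PySem.List.pyRange 1 (page_count + 1) 1
  let known := pages.filter (fun pn => pvTruthy (out.getD pn none))
  if known = [] then out.items
  else ((pages.foldl (pvStepB known) (out, 0)).1).items

-- ===== PRECONDITION & SPEC =====
def Spec_fill_page_best_dos_nearest (page_best_dos_map : List (Int × Option String)) (page_count : Int) (out : List (Int × Option String)) : Prop := out = fill_page_best_dos_nearest_alt page_best_dos_map page_count
instance (page_best_dos_map : List (Int × Option String)) (page_count : Int) (out : List (Int × Option String)) : Decidable (Spec_fill_page_best_dos_nearest page_best_dos_map page_count out) := by unfold Spec_fill_page_best_dos_nearest; infer_instance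

-- ===== CLAIM (what is proved, stated in full; the proofs are below) =====
def Claim_equal_fill_page_best_dos_nearest : Prop := ∀ (page_best_dos_map : List (Int × Option String)) (page_count : Int), Dom_fill_page_best_dos_nearest page_best_dos_map page_count → Spec_fill_page_best_dos_nearest page_best_dos_map page_count (fill_page_best_dos_nearest page_best_dos_map page_count)

-- ===== LEMMAS AND PROOFS =====

-- a fold of inserts with values independent of the dict leaves other keys alone
lemma pv_getD_foldl_insert_not_mem (l : List Int) (f : Int → Option String)
    (d : PySem.Dict Int (Option String)) (pn : Int) (h : pn ∉ l) :
    (l.foldl (fun d x => d.insert x (f x)) d).getD pn none = d.getD pn none := by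
  induction l generalizing d with
  | nil => rfl
  | cons a l ih =>
    simp only [List.mem_cons, not_or] at h
    simp only [List.foldl_cons]
    rw [ih _ h.2, PySem.Dict.getD_insert, if_neg h.1]

-- ... and at a key in the list it returns that key's value
lemma pv_has_getD (l : List Int) (f : Int → Option String)
    (d : PySem.Dict Int (Option String)) (pn : Int) (h : pn ∈ l) :
    (l.foldl (fun d x => d.insert x (f x)) d).getD pn none = f pn := by
  induction l generalizing d with
  | nil => cases h
  | cons a l ih =>
    simp only [List.foldl_cons]
    by_cases hm : pn ∈ l
    · exact ih _ hm
    · have ha : pn = a := by rcases List.mem_cons.mp h with h' | h' <;> [exact h'; exact absurd h' hm]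
      subst ha
      rw [pv_getD_foldl_insert_not_mem _ _ _ _ hm, PySem.Dict.getD_insert_self]

-- pvAdvJ advances to the end of the `< pn` prefix of the remaining suffix
lemma pv_advJ_eq (known : List Int) (pn : Int) (j : Nat) :
    pvAdvJ known pn j = j + ((known.drop j).takeWhile (fun k => decide (k < pn))).length := by
  generalize hn : known.length - j = n
  induction n generalizing j with
  | zero =>
    rw [pvAdvJ, dif_neg (by omega), List.drop_eq_nil_of_le (by omega)]
    simp
  | succ n ih =>
    have hj : j < known.length := by omega
    rw [pvAdvJ, dif_pos hj, List.drop_eq_getElem_cons hj]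
    by_cases hlt : known[j] < pn
    · rw [if_pos hlt, ih (j + 1) (by omega)]
      rw [List.takeWhile_cons_of_pos (by simpa using hlt)]
      simp only [List.length_cons]
      omega
    · rw [if_neg hlt, List.takeWhile_cons_of_neg (by simpa using hlt)]
      simp

-- if the first j elements all satisfy p, takeWhile splits at j
lemma pv_takeWhile_split {p : Int → Bool} :
    ∀ (l : List Int) (j : Nat), (∀ i, (hi : i < l.length) → i < j → p l[i] = true) →
      l.takeWhile p = l.take j ++ (l.drop j).takeWhile p := by
  intro l
  induction l with
  | nil => simp
  | cons a l ih =>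
    intro j hj
    cases j with
    | zero => simp
    | succ j =>
      have ha : p a = true := hj 0 (by simp) (by omega)
      simp only [List.takeWhile_cons_of_pos ha, List.take_succ_cons, List.drop_succ_cons,
        List.cons_append]
      rw [ih j (fun i hi hij => hj (i + 1) (by simpa using hi) (by omega))]

-- on a strictly increasing list, filtering `< pn` is taking the `< pn` prefix
lemma pv_filter_lt (l : List Int) (hs : l.Pairwise (· < ·)) (pn : Int) :
    l.filter (fun k => decide (k < pn)) = l.takeWhile (fun k => decide (k < pn)) := by
  induction l with
  | nil => rfl
  | cons a l ih =>
    rcases List.pairwise_cons.mp hs with ⟨ha, hl⟩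
    by_cases h : a < pn
    · rw [List.filter_cons_of_pos (by simpa using h), List.takeWhile_cons_of_pos (by simpa using h),
        ih hl]
    · rw [List.filter_cons_of_neg (by simpa using h), List.takeWhile_cons_of_neg (by simpa using h),
        List.filter_eq_nil_iff.mpr (fun x hx => by have := ha x hx; simp; omega)]

-- on a strictly increasing list not containing pn, filtering `> pn` is dropping the `< pn` prefix
lemma pv_filter_gt (l : List Int) (hs : l.Pairwise (· < ·)) (pn : Int) (hnm : pn ∉ l) :
    l.filter (fun k => decide (pn < k)) = l.dropWhile (fun k => decide (k < pn)) := by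
  induction l with
  | nil => rfl
  | cons a l ih =>
    rcases List.pairwise_cons.mp hs with ⟨ha, hl⟩
    have hne : a ≠ pn := fun h => hnm (by simp [h])
    by_cases h : a < pn
    · rw [List.filter_cons_of_neg (by simp; omega), List.dropWhile_cons_of_pos (by simpa using h),
        ih hl (fun hm => hnm (List.mem_cons_of_mem _ hm))]
    · have hgt : pn < a := by omega
      rw [List.filter_cons_of_pos (by simpa using hgt),
        List.dropWhile_cons_of_neg (by simpa using h),
        List.filter_eq_self.mpr (fun x hx => by have := ha x hx; simp; omega)]

-- on a strictly increasing suffix, the `< pn` prefix of known is bounded by pn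
lemma pv_tw_lt (known : List Int) (pn : Int) (i : Nat) (hi : i < known.length)
    (hiw : i < ((known.takeWhile (fun k => decide (k < pn))).length)) : known[i] < pn := by
  have hm : known[i]'hi ∈ known.takeWhile (fun k => decide (k < pn)) := by
    have : known[i]? = some ((known.takeWhile (fun k => decide (k < pn)))[i]'hiw) := by
      conv_lhs => rw [← List.takeWhile_append_dropWhile (p := fun k => decide (k < pn)) (l := known)]
      rw [List.getElem?_append_left hiw, List.getElem?_eq_getElem hiw]
    rw [List.getElem?_eq_getElem hi] at this
    rw [Option.some_inj.mp this]
    exact List.getElem_mem hiw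
  simpa using List.mem_takeWhile_imp hm

-- the main loop equivalence: A's per-page filtering = B's two-pointer sweep
lemma pv_loop_eq (out0 : PySem.Dict Int (Option String)) (known : List Int)
    (hk : known ≠ []) (hks : known.Pairwise (· < ·)) :
    ∀ (rest : List Int) (out : PySem.Dict Int (Option String)) (j : Nat),
      rest.Pairwise (· < ·) →
      j ≤ known.length →
      (∀ pn ∈ rest, ∀ i, (hi : i < known.length) → i < j → known[i] < pn) →
      (∀ pn ∈ rest, out.getD pn none = out0.getD pn none) →
      (∀ pn ∈ rest, pvTruthy (out0.getD pn none) = false → pn ∉ known) →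
      rest.foldl (pvStepA known) out = (rest.foldl (pvStepB known) (out, j)).1 := by
  intro rest
  induction rest with
  | nil => intro out j _ _ _ _ _; rfl
  | cons pn rest ih =>
    intro out j hpw hjle hinv1 hinv2 hmem
    rcases List.pairwise_cons.mp hpw with ⟨hhead, htail⟩
    have hout_pn : out.getD pn none = out0.getD pn none := hinv2 pn (List.mem_cons_self)
    simp only [List.foldl_cons]
    by_cases hsk : pvTruthy (out.getD pn none) = true
    · rw [show pvStepA known out pn = out by rw [pvStepA, if_pos hsk],
          show pvStepB known (out, j) pn = (out, j) by rw [pvStepB]; exact if_pos hsk]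
      exact ih out j htail hjle (fun pn' h' i hi hij => hinv1 pn' (List.mem_cons_of_mem _ h') i hi hij)
        (fun pn' h' => hinv2 pn' (List.mem_cons_of_mem _ h'))
        (fun pn' h' => hmem pn' (List.mem_cons_of_mem _ h'))
    · have hnotin : pn ∉ known := hmem pn (List.mem_cons_self) (by rw [← hout_pn]; simpa using hsk)
      have hsplit : known.takeWhile (fun k => decide (k < pn)) ++
          known.dropWhile (fun k => decide (k < pn)) = known := List.takeWhile_append_dropWhile
      set tw := known.takeWhile (fun k => decide (k < pn)) with htw
      set dw := known.dropWhile (fun k => decide (k < pn)) with hdw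
      set w := tw.length with hwdef
      have hwle : w ≤ known.length := (List.takeWhile_sublist _).length_le
      have hadv : pvAdvJ known pn j = w := by
        rw [pv_advJ_eq, hwdef, htw,
          pv_takeWhile_split known j
            (fun i hi hij => by simpa using hinv1 pn (List.mem_cons_self) i hi hij),
          List.length_append, List.length_take, Nat.min_eq_left hjle]
      have hprevA : (known.filter (fun k => decide (k < pn))).getLast? =
          (if 0 < w then known[w - 1]? else none) := by
        rw [pv_filter_lt known hks pn, ← htw]
        by_cases hw : 0 < w
        · rw [if_pos hw, List.getLast?_eq_getElem?, ← hwdef, ← hsplit,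
            List.getElem?_append_left (by omega)]
        · rw [if_neg hw]
          have : tw = [] := List.length_eq_zero_iff.mp (by omega)
          simp [this]
      have hnextA : (known.filter (fun k => decide (pn < k))).head? =
          (if w < known.length then known[w]? else none) := by
        rw [pv_filter_gt known hks pn hnotin, ← hdw]
        by_cases hw : w < known.length
        · rw [if_pos hw, ← List.head?_drop, ← hsplit, hwdef, List.drop_left]
        · rw [if_neg hw]
          have hlen : tw.length + dw.length = known.length := by
            rw [← List.length_append, hsplit]
          have : dw = [] := List.length_eq_zero_iff.mp (by omega)
          simp [this]
      have hih : ∀ v, rest.foldl (pvStepA known) (out.insert pn v) =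
          (rest.foldl (pvStepB known) (out.insert pn v, w)).1 := by
        intro v
        refine ih (out.insert pn v) w htail hwle ?_ ?_
          (fun pn' h' => hmem pn' (List.mem_cons_of_mem _ h'))
        · intro pn' h' i hi hij
          have h1 : known[i] < pn := pv_tw_lt known pn i hi (by omega)
          have h2 : pn < pn' := hhead pn' h'
          omega
        · intro pn' h'
          have hne : pn' ≠ pn := by have := hhead pn' h'; omega
          rw [PySem.Dict.getD_insert, if_neg hne]
          exact hinv2 pn' (List.mem_cons_of_mem _ h')
      have hstepA : pvStepA known out pn =
          (match (if 0 < w then known[w - 1]? else none), (if w < known.length then known[w]? else none) with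
            | none, none => out
            | none, some np => out.insert pn (out.getD np none)
            | some pp, none => out.insert pn (out.getD pp none)
            | some pp, some np =>
                if pn - pp ≤ np - pn then out.insert pn (out.getD pp none)
                else out.insert pn (out.getD np none)) := by
        rw [pvStepA, if_neg hsk, ← hprevA, ← hnextA]
      have hstepB : pvStepB known (out, j) pn =
          (match (if 0 < w then known[w - 1]? else none), (if w < known.length then known[w]? else none) with
            | none, none => (out.insert pn none, w)
            | none, some np => (out.insert pn (out.getD np none), w)
            | some pp, none => (out.insert pn (out.getD pp none), w)
            | some pp, some np =>
                if pn - pp ≤ np - pn then (out.insert pn (out.getD pp none), w)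
                else (out.insert pn (out.getD np none), w)) := by
        rw [pvStepB]; simp only [if_neg hsk, hadv]
      rw [hstepA, hstepB]
      rcases hP : (if 0 < w then known[w - 1]? else none) with _ | pp <;>
        rcases hN : (if w < known.length then known[w]? else none) with _ | np
      · exfalso
        have hw0 : ¬ 0 < w := by
          intro h
          rw [if_pos h, List.getElem?_eq_getElem (by omega)] at hP
          simp at hP
        have hwl : ¬ w < known.length := by
          intro h
          rw [if_pos h, List.getElem?_eq_getElem h] at hN
          simp at hN
        exact hk (List.length_eq_zero_iff.mp (by omega))
      · exact hih _
      · exact hih _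
      · by_cases hle : pn - pp ≤ np - pn
        · simpa only [if_pos hle] using hih (out.getD pp none)
        · simpa only [if_neg hle] using hih (out.getD np none)

-- ===== VERDICT (by name: the statement is the Claim_ definition above) =====
theorem fill_page_best_dos_nearest_spec : Claim_equal_fill_page_best_dos_nearest := by
  intro m n _
  unfold Spec_fill_page_best_dos_nearest fill_page_best_dos_nearest fill_page_best_dos_nearest_alt
  set out0 := PySem.Dict.ofList m with hout0
  set pages := PySem.List.pyRange 1 (n + 1) 1 with hpages
  have hkn : pages.filter
        (fun pn => pvTruthy ((pages.foldl (fun d pn => d.insert pn (out0.getD pn none)) PySem.Dict.empty).getD pn none)) =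
      pages.filter (fun pn => pvTruthy (out0.getD pn none)) :=
    List.filter_congr (fun x hx => by rw [pv_has_getD _ _ _ _ hx])
  simp only [hkn]
  set known := pages.filter (fun pn => pvTruthy (out0.getD pn none)) with hknown
  by_cases hk : known = []
  · simp [hk]
  · rw [if_neg hk, if_neg hk]
    have hpw : pages.Pairwise (· < ·) := PySem.List.pairwise_lt_pyRange_one 1 (n + 1)
    have hks : known.Pairwise (· < ·) := hpw.sublist List.filter_sublist
    congr 1
    exact pv_loop_eq out0 known hk hks pages out0 0 hpw (Nat.zero_le _)
      (fun _ _ i _ h => absurd h (by omega))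
      (fun _ _ => rfl)
      (fun pn hpn hfalse hmem => by
        have := (List.mem_filter.mp (hknown ▸ hmem)).2
        rw [hfalse] at this
        exact Bool.false_ne_true this)
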